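-- pv_equiv track=rewrite | github.com/rfael5/bcsmProjects | totalProdutosComposicao.py | agruparLinhas
-- ===== SOURCE A (Python) =====
-- def agruparLinhas(produto):
--
--     if '\x00' in produto['linha']:
--         produto['linha'] = produto['linha'].replace('\x00', '')
--
--     for x in range(1, 7):
--         if produto['linha'] == f'S{x}':
--             return 'Sal'
--
--     for x in range(1, 7):
--         if produto['linha'] == f'M-{x}':
--             return 'Doces'
--
--     for x in range(1, 4):
--         if produto['linha'] == f'C-{x}' or produto['linha'] == 'Doce Geral':
--             return 'Doces'
--
--     if produto['linha'] == 'S7' or produto['linha'] == 'S8':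
--         return 'Refeições'
-- ===== SOURCE B (Python) =====
-- def agruparLinhas(produto):
--     if '\x00' in produto['linha']:
--         produto['linha'] = produto['linha'].replace('\x00', '')
--     l = produto['linha']
--     if l == 'Doce Geral':
--         return 'Doces'
--     if len(l) == 2:
--         if l[0] == 'S':
--             if l[1] in '123456':
--                 return 'Sal'
--             if l[1] in '78':
--                 return 'Refeições'
--     elif len(l) == 3:
--         if l[1] == '-':
--             if l[0] == 'M' and l[2] in '123456':
--                 return 'Doces'
--             if l[0] == 'C' and l[2] in '123':
--                 return 'Doces'
--     return None
-- ===== Notes on version B (the rewrite author's own statement) =====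
-- stated objective: alternative
-- what changed: A scans 15 candidate strings built with f-strings in four sequential loops; B instead parses the line structurally (length, prefix letter, '-' separator, digit-range of the last character) and classifies from that shape, never enumerating candidates.
import Mathlib
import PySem

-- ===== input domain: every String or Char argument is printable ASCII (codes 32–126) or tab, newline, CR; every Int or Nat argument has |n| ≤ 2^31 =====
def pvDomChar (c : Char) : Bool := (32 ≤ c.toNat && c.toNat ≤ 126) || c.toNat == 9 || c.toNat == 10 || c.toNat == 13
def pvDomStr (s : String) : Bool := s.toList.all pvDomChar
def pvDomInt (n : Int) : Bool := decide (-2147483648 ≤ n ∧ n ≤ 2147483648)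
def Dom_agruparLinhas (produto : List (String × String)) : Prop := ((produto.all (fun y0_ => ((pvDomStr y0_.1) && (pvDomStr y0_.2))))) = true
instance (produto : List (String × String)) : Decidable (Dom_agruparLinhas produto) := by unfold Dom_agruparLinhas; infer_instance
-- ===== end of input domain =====

-- B replaces A's four candidate-enumerating loops by a structural parse of the line string
-- (length, prefix letter, '-' separator, digit range of the last character); equivalence is
-- about the RETURN value only — both Pythons perform the same in-place '\x00'-strip
-- reassignment of produto['linha'].

-- ===== PORT A =====
-- strings are handled on the List Char side (PySem.Chars); f'S{x}' is ported exactly as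
-- 'S' :: PySem.Int.toChars x (Python str concatenation of a literal with str(x)).
def pvLoopSal (cs : List Char) : List Int → Option String
  | [] => none
  | x :: xs => if cs = 'S' :: PySem.Int.toChars x then some "Sal" else pvLoopSal cs xs

def pvLoopM (cs : List Char) : List Int → Option String
  | [] => none
  | x :: xs => if cs = 'M' :: '-' :: PySem.Int.toChars x then some "Doces" else pvLoopM cs xs

def pvLoopC (cs : List Char) : List Int → Option String
  | [] => none
  | x :: xs => if cs = 'C' :: '-' :: PySem.Int.toChars x ∨ cs = "Doce Geral".toList then some "Doces" else pvLoopC cs xs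

-- the body of A after the dict read: the four sequential early-return loops, then the implicit None
def pvClassify (cs : List Char) : Option String :=
  match pvLoopSal cs (PySem.List.pyRange 1 7 1) with
  | some r => some r
  | none =>
    match pvLoopM cs (PySem.List.pyRange 1 7 1) with
    | some r => some r
    | none =>
      match pvLoopC cs (PySem.List.pyRange 1 4 1) with
      | some r => some r
      | none =>
        if cs = "S7".toList ∨ cs = "S8".toList then some "Refeições" else none

def agruparLinhas (produto : List (String × String)) : Option String :=
  match (PySem.Dict.mk produto).get? "linha" with
  | none => none   -- produto['linha'] raises KeyError; excluded by Pre_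
  | some l0 =>
    let cs0 := l0.toList
    -- if '\x00' in produto['linha']: produto['linha'] = produto['linha'].replace('\x00', '')
    let cs := if PySem.Chars.isIn ['\x00'] cs0 then PySem.Chars.replace cs0 ['\x00'] [] else cs0
    pvClassify cs

-- ===== PORT B =====
-- Source B's structural classifier: the len checks + guarded indexing l[0]/l[1]/l[2] are ported
-- as a shape match on the char list (a match arm [a, d] IS Python's len(l)==2 plus l[0]=a, l[1]=d);
-- `l[i] in '123456'` is char membership in that digit list.
def pvParse (cs : List Char) : Option String :=
  if cs = "Doce Geral".toList then some "Doces"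
  else
    match cs with
    | [a, d] =>
      if a = 'S' then
        if d ∈ ['1','2','3','4','5','6'] then some "Sal"
        else if d ∈ ['7','8'] then some "Refeições"
        else none
      else none
    | [a, h, d] =>
      if h = '-' then
        if a = 'M' ∧ d ∈ ['1','2','3','4','5','6'] then some "Doces"
        else if a = 'C' ∧ d ∈ ['1','2','3'] then some "Doces"
        else none
      else none
    | _ => none

def agruparLinhas_alt (produto : List (String × String)) : Option String :=
  match (PySem.Dict.mk produto).get? "linha" with
  | none => none   -- produto['linha'] raises KeyError; excluded by Pre_
  | some l0 =>
    let cs0 := l0.toList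
    let cs := if PySem.Chars.isIn ['\x00'] cs0 then PySem.Chars.replace cs0 ['\x00'] [] else cs0
    pvParse cs

-- ===== PRECONDITION & SPEC =====
-- Pre_ excludes exactly the dicts without a 'linha' key, on which A raises KeyError.
def Pre_agruparLinhas (produto : List (String × String)) : Prop :=
  ((PySem.Dict.mk produto).get? "linha").isSome = true
instance (produto : List (String × String)) : Decidable (Pre_agruparLinhas produto) := by unfold Pre_agruparLinhas; infer_instance

def pvWitness_agruparLinhas : (List (String × String)) := [("linha", "S1")]

def Spec_agruparLinhas (produto : List (String × String)) (out : Option String) : Prop := out = agruparLinhas_alt produto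
instance (produto : List (String × String)) (out : Option String) : Decidable (Spec_agruparLinhas produto out) := by unfold Spec_agruparLinhas; infer_instance

-- ===== CLAIM (what is proved, stated in full; the proofs are below) =====
def Claim_equal_agruparLinhas : Prop := ∀ (produto : List (String × String)), Dom_agruparLinhas produto → Pre_agruparLinhas produto → Spec_agruparLinhas produto (agruparLinhas produto)

-- ===== LEMMAS AND PROOFS =====

-- the core: A's candidate-scanning loops and B's structural parse agree on every line string
theorem pvClassify_eq_parse (cs : List Char) : pvClassify cs = pvParse cs := by
  have h1 : PySem.List.pyRange 1 7 1 = [1,2,3,4,5,6] := by decide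
  have h2 : PySem.List.pyRange 1 4 1 = [1,2,3] := by decide
  have t1 : PySem.Int.toChars 1 = ['1'] := by decide
  have t2 : PySem.Int.toChars 2 = ['2'] := by decide
  have t3 : PySem.Int.toChars 3 = ['3'] := by decide
  have t4 : PySem.Int.toChars 4 = ['4'] := by decide
  have t5 : PySem.Int.toChars 5 = ['5'] := by decide
  have t6 : PySem.Int.toChars 6 = ['6'] := by decide
  by_cases hdg : cs = "Doce Geral".toList
  · subst hdg; decide
  rcases cs with _ | ⟨a, _ | ⟨b, _ | ⟨c, _ | ⟨e, t⟩⟩⟩⟩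
  · decide
  · simp [pvClassify, pvParse, pvLoopSal, pvLoopM, pvLoopC, h1, h2, t1, t2, t3, t4, t5, t6]
  · -- length 2
    by_cases ha : a = 'S'
    · subst ha
      by_cases b1 : b = '1'; · subst b1; decide
      by_cases b2 : b = '2'; · subst b2; decide
      by_cases b3 : b = '3'; · subst b3; decide
      by_cases b4 : b = '4'; · subst b4; decide
      by_cases b5 : b = '5'; · subst b5; decide
      by_cases b6 : b = '6'; · subst b6; decide
      by_cases b7 : b = '7'; · subst b7; decide
      by_cases b8 : b = '8'; · subst b8; decide
      simp [pvClassify, pvParse, pvLoopSal, pvLoopM, pvLoopC, h1, h2, t1, t2, t3, t4, t5, t6,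
            b1, b2, b3, b4, b5, b6, b7, b8]
    · simp [pvClassify, pvParse, pvLoopSal, pvLoopM, pvLoopC, h1, h2, t1, t2, t3, t4, t5, t6, ha]
  · -- length 3
    by_cases hb : b = '-'
    · subst hb
      by_cases ha : a = 'M'
      · subst ha
        by_cases c1 : c = '1'; · subst c1; decide
        by_cases c2 : c = '2'; · subst c2; decide
        by_cases c3 : c = '3'; · subst c3; decide
        by_cases c4 : c = '4'; · subst c4; decide
        by_cases c5 : c = '5'; · subst c5; decide
        by_cases c6 : c = '6'; · subst c6; decide
        simp [pvClassify, pvParse, pvLoopSal, pvLoopM, pvLoopC, h1, h2, t1, t2, t3, t4, t5, t6,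
              c1, c2, c3, c4, c5, c6]
      · by_cases ha2 : a = 'C'
        · subst ha2
          by_cases c1 : c = '1'; · subst c1; decide
          by_cases c2 : c = '2'; · subst c2; decide
          by_cases c3 : c = '3'; · subst c3; decide
          simp [pvClassify, pvParse, pvLoopSal, pvLoopM, pvLoopC, h1, h2, t1, t2, t3, t4, t5, t6,
                c1, c2, c3]
        · simp [pvClassify, pvParse, pvLoopSal, pvLoopM, pvLoopC, h1, h2, t1, t2, t3, t4, t5, t6,
                ha, ha2]
    · simp [pvClassify, pvParse, pvLoopSal, pvLoopM, pvLoopC, h1, h2, t1, t2, t3, t4, t5, t6, hb]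
  · -- length ≥ 4 (includes the already-handled 'Doce Geral' via hdg)
    have hD : ¬(a = 'D' ∧ b = 'o' ∧ c = 'c' ∧ e = 'e' ∧ t = [' ', 'G', 'e', 'r', 'a', 'l']) := by
      simpa using hdg
    simp [pvClassify, pvParse, pvLoopSal, pvLoopM, pvLoopC, h1, h2, t1, t2, t3, t4, t5, t6, hD]

-- ===== VERDICT (by name: the statement is the Claim_ definition above) =====
theorem agruparLinhas_spec : Claim_equal_agruparLinhas := by
  intro produto _ hpre
  unfold Spec_agruparLinhas agruparLinhas agruparLinhas_alt
  rcases Option.isSome_iff_exists.mp hpre with ⟨l0, hl⟩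
  rw [hl]
  exact pvClassify_eq_parse _
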